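-- pv_equiv track=rewrite | github.com/zeunny/APS | programmers/12902.py | solution
-- ===== SOURCE A (Python) =====
-- def solution(n):
--     if n % 2:
--         return 0
--
--     dp = [0,3,11]
--     index = n//2
--
--     if index < 3:
--         return dp[index]
--
--     for i in range(3, index+1):
--         dp.append((dp[i-1]*3+sum(dp[1:i-1])*2+2)%1000000007)
--
--     return dp[index]
-- ===== SOURCE B (Python) =====
-- def solution(n):
--     # DP with a running prefix sum instead of re-summing the list each step;
--     # returns 0 for negative widths.
--     if n % 2 or n < 0:
--         return 0
--     k = n // 2
--     if k == 0:
--         return 0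
--     MOD = 1000000007
--     prev, s = 3, 0  # prev = dp[i], s = (dp[1] + ... + dp[i-1]) % MOD
--     for _ in range(k - 1):
--         prev, s = (prev * 3 + 2 * s + 2) % MOD, (s + prev) % MOD
--     return prev
-- ===== Notes on version B (the rewrite author's own statement) =====
-- stated objective: alternative
-- what changed: B replaces the dp list with two scalars (last value and a running mod prefix sum), so it never re-sums dp[1:i-1] and stores no list.
-- intended difference: On n = -2 and n = -4 A returns 11 resp. 3 because index = n//2 is negative and dp[index] wraps around the seed list; B returns 0, the intended count of tilings of a negative width. — e.g. on solution(-2): A returns 11, B returns 0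
import Mathlib
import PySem

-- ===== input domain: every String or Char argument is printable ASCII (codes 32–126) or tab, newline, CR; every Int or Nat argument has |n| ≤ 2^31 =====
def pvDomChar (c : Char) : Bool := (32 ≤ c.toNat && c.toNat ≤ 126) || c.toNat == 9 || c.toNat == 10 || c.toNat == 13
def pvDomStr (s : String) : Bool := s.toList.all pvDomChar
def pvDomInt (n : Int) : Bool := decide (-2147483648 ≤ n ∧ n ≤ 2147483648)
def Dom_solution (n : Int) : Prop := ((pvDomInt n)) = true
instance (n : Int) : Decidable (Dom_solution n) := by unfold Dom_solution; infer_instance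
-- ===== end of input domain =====

-- B keeps just two scalars (last dp value and a running mod prefix sum) instead of A's dp list re-summed each iteration.


-- ===== PORT A =====
def solStepA (dp : List Int) (i : Int) : List Int :=
  dp ++ [PySem.Int.mod ((PySem.List.pyGet? dp (i - 1)).getD 0 * 3
          + (PySem.List.slice dp (some 1) (some (i - 1))).sum * 2 + 2) 1000000007]

def solution (n : Int) : Int :=
  if PySem.Int.mod n 2 ≠ 0 then 0
  else
    let dp : List Int := [0, 3, 11]
    let index := PySem.Int.floordiv n 2
    if index < 3 then (PySem.List.pyGet? dp index).getD 0
    else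
      let dp' := (PySem.List.pyRange 3 (index + 1) 1).foldl solStepA dp
      (PySem.List.pyGet? dp' index).getD 0

-- ===== PORT B =====
def solStepB (st : Int × Int) : Int × Int :=
  (PySem.Int.mod (st.1 * 3 + 2 * st.2 + 2) 1000000007,
   PySem.Int.mod (st.2 + st.1) 1000000007)

def solution_alt (n : Int) : Int :=
  if PySem.Int.mod n 2 ≠ 0 ∨ n < 0 then 0
  else
    let k := PySem.Int.floordiv n 2
    if k = 0 then 0
    else ((PySem.List.pyRange 0 (k - 1) 1).foldl (fun st _ => solStepB st) (3, 0)).1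

-- ===== PRECONDITION & SPEC =====
-- Pre_ excludes exactly the even n ≤ -8, on which A raises IndexError (negative dp index out of range).
def Pre_solution (n : Int) : Prop := PySem.Int.mod n 2 ≠ 0 ∨ -6 ≤ n
instance (n : Int) : Decidable (Pre_solution n) := by unfold Pre_solution; infer_instance
def pvWitness_solution : Int := 10

-- On n = -2 and n = -4 A returns 11 resp. 3 by negative-index wraparound of the seed list; B returns 0, the intended count for a negative width.
def D_solution (n : Int) : Prop := n = -2 ∨ n = -4
instance (n : Int) : Decidable (D_solution n) := by unfold D_solution; infer_instance
def Spec_solution (n : Int) (out : Int) : Prop := ¬ D_solution n → out = solution_alt n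
instance (n : Int) (out : Int) : Decidable (Spec_solution n out) := by unfold Spec_solution; infer_instance
def pvDiffWitness_solution : Int := -2
def pvDiffWitnessOut_solution : Int × Int := (11, 0)

-- ===== CLAIM (what is proved, stated in full; the proofs are below) =====
def Claim_unchanged_solution : Prop := ∀ (n : Int), Dom_solution n → Pre_solution n → Spec_solution n (solution n)
def Claim_changed_solution : Prop := Dom_solution (pvDiffWitness_solution) ∧ Pre_solution (pvDiffWitness_solution) ∧ D_solution (pvDiffWitness_solution) ∧ solution (pvDiffWitness_solution) = pvDiffWitnessOut_solution.1 ∧ solution_alt (pvDiffWitness_solution) = pvDiffWitnessOut_solution.2 ∧ pvDiffWitnessOut_solution.1 ≠ pvDiffWitnessOut_solution.2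
def Claim_exact_solution : Prop := ∀ (n : Int), Dom_solution n → Pre_solution n → D_solution n → solution n ≠ solution_alt n

-- ===== LEMMAS AND PROOFS =====

-- A's dp list after the loop has processed i = 3 .. j+2 (pure recursion over the iteration count).
def solAList : Nat → List Int
  | 0 => [0, 3, 11]
  | j + 1 => solStepA (solAList j) ((j : Int) + 3)

-- B's state after t iterations.
def solBIter : Nat → Int × Int
  | 0 => (3, 0)
  | t + 1 => solStepB (solBIter t)

lemma sol_mod (a : Int) : PySem.Int.mod a 1000000007 = a % 1000000007 :=
  PySem.Int.mod_eq_emod_of_pos (by norm_num)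

lemma sol_mod2 (a : Int) : PySem.Int.mod a 2 = a % 2 :=
  PySem.Int.mod_eq_emod_of_pos (by norm_num)

lemma solAList_fold (j : Nat) :
    (PySem.List.pyRange 3 ((j : Int) + 3) 1).foldl solStepA [0, 3, 11] = solAList j := by
  induction j with
  | zero => simp [PySem.List.pyRange_one_eq_nil, solAList]
  | succ j ih =>
    rw [show (((j + 1 : Nat) : Int) + 3) = ((j : Int) + 3) + 1 by push_cast; ring,
        PySem.List.pyRange_one_succ_right (by omega), List.foldl_append]
    simp [ih, solAList]

lemma solBIter_fold (t : Nat) :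
    (PySem.List.pyRange 0 (t : Int) 1).foldl (fun st _ => solStepB st) (3, 0) = solBIter t := by
  induction t with
  | zero => simp [PySem.List.pyRange_one_eq_nil, solBIter]
  | succ t ih =>
    rw [show ((t + 1 : Nat) : Int) = (t : Int) + 1 by push_cast; ring,
        PySem.List.pyRange_one_succ_right (by omega), List.foldl_append]
    simp [ih, solBIter]

-- getD through pyGet?
lemma sol_pyGetD (L : List Int) (m : Nat) :
    (PySem.List.pyGet? L (m : Int)).getD 0 = L.getD m 0 := by
  simp [PySem.List.pyGet?_natCast, List.getD]

-- The key invariant tying A's list to B's two scalars.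
lemma sol_invariant (j : Nat) :
    (solAList j).length = j + 3 ∧
    solBIter (j + 1) =
      ((solAList j).getD (j + 2) 0,
       ((((solAList j).drop 1).take (j + 1)).sum) % 1000000007) := by
  induction j with
  | zero => decide
  | succ j ih =>
    obtain ⟨hlen, hst⟩ := ih
    set L := solAList j with hL
    have hidx : (j : Int) + 3 - 1 = ((j + 2 : Nat) : Int) := by push_cast; ring
    have hget : (PySem.List.pyGet? L ((j : Int) + 3 - 1)).getD 0 = L.getD (j + 2) 0 := by
      rw [hidx, sol_pyGetD]
    have hsl : PySem.List.slice L (some 1) (some ((j : Int) + 3 - 1))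
        = (L.drop 1).take (j + 1) := by
      rw [show ((j : Int) + 3 - 1) = ((j : Int) + 2) by ring,
          PySem.List.slice_toNat L (by omega) (by omega)]
      have h1 : ((1 : Int)).toNat = 1 := rfl
      have h2 : (((j : Int) + 2)).toNat = j + 2 := by omega
      rw [h1, h2]
      congr 1
    have hx : solAList (j + 1) = L ++
        [PySem.Int.mod (L.getD (j + 2) 0 * 3 + ((L.drop 1).take (j + 1)).sum * 2 + 2) 1000000007] := by
      show solStepA L ((j : Int) + 3) = _
      rw [solStepA, hget, hsl]
    have hdropL : L.drop (j + 2) = [L.getD (j + 2) 0] := by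
      have hj2 : j + 2 < L.length := by omega
      rw [List.drop_eq_getElem_cons hj2, List.getD_eq_getElem _ _ hj2]
      have : L.drop (j + 2 + 1) = [] := by
        apply List.drop_eq_nil_of_le; omega
      rw [this]
    have hsum : (L.drop 1).sum = ((L.drop 1).take (j + 1)).sum + L.getD (j + 2) 0 := by
      conv_lhs => rw [← List.take_append_drop (j + 1) (L.drop 1)]
      rw [List.sum_append, List.drop_drop]
      rw [show 1 + (j + 1) = j + 2 by ring] at *
      rw [hdropL]
      simp
    constructor
    · rw [hx]; simp [hlen]
    · show solStepB (solBIter (j + 1)) = _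
      rw [hst, hx]
      have hgetx : (L ++ [PySem.Int.mod (L.getD (j + 2) 0 * 3 + ((L.drop 1).take (j + 1)).sum * 2 + 2) 1000000007]).getD (j + 1 + 2) 0
          = PySem.Int.mod (L.getD (j + 2) 0 * 3 + ((L.drop 1).take (j + 1)).sum * 2 + 2) 1000000007 := by
        rw [List.getD, List.getElem?_append_right (by omega)]
        simp [hlen]
      have hdrop1 : ((L ++ [PySem.Int.mod (L.getD (j + 2) 0 * 3 + ((L.drop 1).take (j + 1)).sum * 2 + 2) 1000000007]).drop 1).take (j + 1 + 1) = L.drop 1 := by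
        rw [List.drop_append_of_le_length (by omega)]
        apply List.take_left'
        simp [hlen]
      rw [solStepB, hgetx, hdrop1]
      set a := L.getD (j + 2) 0
      set S := ((L.drop 1).take (j + 1)).sum
      refine Prod.ext ?_ ?_
      · show PySem.Int.mod (a * 3 + 2 * (S % 1000000007) + 2) 1000000007
            = PySem.Int.mod (a * 3 + S * 2 + 2) 1000000007
        rw [sol_mod, sol_mod]; omega
      · show PySem.Int.mod (S % 1000000007 + a) 1000000007 = (L.drop 1).sum % 1000000007
        rw [sol_mod, hsum]; omega

lemma sol_main (m : Nat) (hm : 3 ≤ m) :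
    solution (2 * (m : Int)) = solution_alt (2 * (m : Int)) := by
  have hmod : PySem.Int.mod (2 * (m : Int)) 2 = 0 := by rw [sol_mod2]; omega
  have hfd : PySem.Int.floordiv (2 * (m : Int)) 2 = (m : Int) := by
    rw [PySem.Int.floordiv_eq_ediv_of_pos (by norm_num)]; omega
  obtain ⟨hlen, hst⟩ := sol_invariant (m - 2)
  have hA : solution (2 * (m : Int)) = (solAList (m - 2)).getD m 0 := by
    rw [solution, if_neg (by omega), hfd]
    rw [if_neg (by omega)]
    rw [show (m : Int) + 1 = (((m - 2 : Nat) : Int) + 3) by omega,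
        solAList_fold]
    rw [show (m : Int) = ((m : Nat) : Int) from rfl, sol_pyGetD]
  have hB : solution_alt (2 * (m : Int)) = (solBIter (m - 1)).1 := by
    rw [solution_alt, if_neg (by omega), hfd]
    rw [if_neg (by omega)]
    rw [show (m : Int) - 1 = ((m - 1 : Nat) : Int) by omega, solBIter_fold]
  rw [hA, hB, show m - 1 = (m - 2) + 1 by omega, hst,
      show (m - 2) + 2 = m by omega]

-- ===== VERDICT (by name: the statement is the Claim_ definition above) =====
theorem solution_spec : Claim_unchanged_solution := by
  intro n _ hpre hnd
  show solution n = solution_alt n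
  by_cases h2 : PySem.Int.mod n 2 = 0
  · have h2' : n % 2 = 0 := by rwa [sol_mod2] at h2
    by_cases hneg : n < 0
    · have h6 : n = -6 := by
        rcases hpre with h | h
        · exact absurd h2 h
        · have hd2 : n ≠ -2 := fun he => hnd (Or.inl he)
          have hd4 : n ≠ -4 := fun he => hnd (Or.inr he)
          omega
      subst h6; decide
    · obtain ⟨m, hm⟩ : ∃ m : Nat, n = 2 * (m : Int) := ⟨(n / 2).toNat, by omega⟩
      subst hm
      by_cases hm3 : 3 ≤ m
      · exact sol_main m hm3
      · have : m < 3 := by omega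
        interval_cases m <;> decide
  · rw [solution, if_pos h2, solution_alt, if_pos (Or.inl h2)]

theorem solution_changed : Claim_changed_solution := by unfold Claim_changed_solution; decide

theorem solution_tight : Claim_exact_solution := by
  intro n _ _ hd
  rcases hd with h | h <;> subst h <;> decide
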